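-- pv_equiv track=rewrite | github.com/Minorli/ob_comparator | run_fixup.py | invalidate_exists_cache
-- ===== SOURCE A (Python) =====
-- from typing import Any, Dict, List, NamedTuple, Optional, Sequence, Set, Tuple, Union
--
-- def invalidate_exists_cache(
--     exists_cache: Dict[Tuple[str, str], bool], planned_objects: Set[Tuple[str, str]]
-- ) -> int:
--     removed = 0
--     for full_name, obj_type in planned_objects:
--         # Use the same key format as check_object_exists: (full_name.upper(), obj_type.upper())
--         key = (full_name.upper(), obj_type.upper())
--         if key in exists_cache:
--             exists_cache.pop(key, None)
--             removed += 1
--     return removed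
-- ===== SOURCE B (Python) =====
-- def invalidate_exists_cache(exists_cache, planned_objects):
--     # Traverse the CACHE (not the planned set): keep every entry whose key is
--     # not planned, rebuild the dict from the kept entries, and return the
--     # shrinkage in size.
--     planned = {(n.upper(), t.upper()) for n, t in planned_objects}
--     kept = {k: v for k, v in exists_cache.items() if k not in planned}
--     removed = len(exists_cache) - len(kept)
--     exists_cache.clear()
--     exists_cache.update(kept)
--     return removed
-- ===== Notes on version B (the rewrite author's own statement) =====
-- stated objective: alternative
-- what changed: B inverts the traversal: instead of A's loop over planned_objects that checks/pops/counts against the cache, B precomputes the uppercased planned-key set, iterates over the CACHE rebuilding it as a filtered dict of the surviving entries, and returns the size shrinkage (old len minus kept len).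
import Mathlib
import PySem

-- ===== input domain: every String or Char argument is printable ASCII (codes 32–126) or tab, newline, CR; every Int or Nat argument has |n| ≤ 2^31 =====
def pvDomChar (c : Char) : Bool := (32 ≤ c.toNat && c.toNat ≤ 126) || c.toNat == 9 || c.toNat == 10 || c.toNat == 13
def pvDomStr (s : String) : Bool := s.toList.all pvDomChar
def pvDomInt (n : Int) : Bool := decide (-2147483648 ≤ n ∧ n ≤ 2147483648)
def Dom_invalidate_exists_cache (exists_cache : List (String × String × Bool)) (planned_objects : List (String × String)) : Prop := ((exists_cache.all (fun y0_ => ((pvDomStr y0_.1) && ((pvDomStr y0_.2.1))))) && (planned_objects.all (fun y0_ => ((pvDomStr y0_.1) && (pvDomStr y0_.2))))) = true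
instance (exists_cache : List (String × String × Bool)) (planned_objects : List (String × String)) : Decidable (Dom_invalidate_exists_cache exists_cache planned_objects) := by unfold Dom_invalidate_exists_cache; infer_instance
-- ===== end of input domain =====

-- B inverts the traversal: A loops over planned_objects checking/popping the cache; B iterates
-- over the cache itself, rebuilding it as a dict filtered against the precomputed planned-key
-- set, and returns the size shrinkage (objective: alternative). Both mutate exists_cache to the
-- same final content; the equivalence proved here is about the return value.


-- ===== PORT A =====
-- the dict is the flattened assoc list (full_name, obj_type, flag); its key is the first two components
def pvKeyOf (e : String × String × Bool) : String × String := (e.1, e.2.1)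

-- hand port of dict.pop(key, None)'s effect on the assoc list: remove the first entry with that key (exact: a dict has at most one)
def pvDictPop : List (String × String × Bool) → String × String → List (String × String × Bool)
  | [], _ => []
  | e :: rest, k => if pvKeyOf e == k then rest else e :: pvDictPop rest k

def invalidate_exists_cache (exists_cache : List (String × String × Bool)) (planned_objects : List (String × String)) : Int :=
  (planned_objects.foldl
    (fun (st : List (String × String × Bool) × Int) p =>
      let key := (PySem.Str.upper p.1, PySem.Str.upper p.2)
      if st.1.any (fun e => pvKeyOf e == key)    -- 'key in exists_cache'
      then (pvDictPop st.1 key, st.2 + 1)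
      else st)
    (exists_cache, 0)).2

-- ===== PORT B =====
def invalidate_exists_cache_alt (exists_cache : List (String × String × Bool)) (planned_objects : List (String × String)) : Int :=
  let planned : PySem.Set (String × String) :=
    PySem.Set.ofList (planned_objects.map (fun p => (PySem.Str.upper p.1, PySem.Str.upper p.2)))
  -- kept = {k: v for k, v in exists_cache.items() if k not in planned}
  let kept := exists_cache.filter (fun e => !(PySem.Set.contains planned (e.1, e.2.1)))
  -- removed = len(exists_cache) - len(kept); the clear/update only mutates the dict
  (exists_cache.length : Int) - (kept.length : Int)

-- ===== PRECONDITION & SPEC =====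
-- Pre_ only states the Python-dict representation invariant: the assoc list has no duplicate keys.
-- It excludes no input that arises from a Python dict (which cannot hold a key twice).
def Pre_invalidate_exists_cache (exists_cache : List (String × String × Bool)) (planned_objects : List (String × String)) : Prop :=
  (exists_cache.map (fun e => (e.1, e.2.1))).Nodup
instance (exists_cache : List (String × String × Bool)) (planned_objects : List (String × String)) : Decidable (Pre_invalidate_exists_cache exists_cache planned_objects) := by unfold Pre_invalidate_exists_cache; infer_instance
def pvWitness_invalidate_exists_cache : (List (String × String × Bool)) × (List (String × String)) :=
  ([("A", "TABLE", true), ("B", "VIEW", false)], [("a", "table"), ("c", "view")])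
def Spec_invalidate_exists_cache (exists_cache : List (String × String × Bool)) (planned_objects : List (String × String)) (out : Int) : Prop := out = invalidate_exists_cache_alt exists_cache planned_objects
instance (exists_cache : List (String × String × Bool)) (planned_objects : List (String × String)) (out : Int) : Decidable (Spec_invalidate_exists_cache exists_cache planned_objects out) := by unfold Spec_invalidate_exists_cache; infer_instance

-- ===== CLAIM =====
def Claim_equal_invalidate_exists_cache : Prop := ∀ (exists_cache : List (String × String × Bool)) (planned_objects : List (String × String)), Dom_invalidate_exists_cache exists_cache planned_objects → Pre_invalidate_exists_cache exists_cache planned_objects → Spec_invalidate_exists_cache exists_cache planned_objects (invalidate_exists_cache exists_cache planned_objects)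

-- ===== LEMMAS AND PROOFS =====

lemma pvDictPop_map_keyOf (d : List (String × String × Bool)) (k : String × String) :
    (pvDictPop d k).map pvKeyOf = (d.map pvKeyOf).erase k := by
  induction d with
  | nil => rfl
  | cons e rest ih =>
    simp only [pvDictPop, List.map_cons, List.erase_cons]
    by_cases h : pvKeyOf e = k
    · simp [h]
    · simp [h, ih]

-- one hit of A's loop: the counted key leaves the dict, the count grows by one
lemma pvHit {α : Type} [BEq α] [LawfulBEq α] (K L : List α) (k : α) (hK : K.Nodup) (hk : k ∈ K) :
    (K.filter (fun x => (k :: L).contains x)).length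
      = 1 + ((K.erase k).filter (fun x => L.contains x)).length := by
  have hperm : List.Perm K (k :: K.erase k) := List.perm_cons_erase hk
  rw [(hperm.filter _).length_eq]
  simp only [List.filter_cons]
  have : (k :: L).contains k = true := by simp
  rw [this]
  have : (K.erase k).filter (fun x => (k :: L).contains x)
       = (K.erase k).filter (fun x => L.contains x) := by
    apply List.filter_congr
    intro x hx
    have hne : x ≠ k := ((List.Nodup.mem_erase_iff hK).1 hx).1
    simp [hne]
  rw [this]
  simp [Nat.add_comm]

-- a miss of A's loop changes nothing on either side
lemma pvMiss {α : Type} [BEq α] [LawfulBEq α] (K L : List α) (k : α) (hk : k ∉ K) :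
    (K.filter (fun x => (k :: L).contains x)).length
      = (K.filter (fun x => L.contains x)).length := by
  congr 1
  apply List.filter_congr
  intro x hx
  have hne : x ≠ k := fun h => hk (h ▸ hx)
  simp [hne]

-- A's loop counts exactly the cache keys hit by the planned list
lemma pvFoldA (l : List (String × String)) (d : List (String × String × Bool)) (r : Int)
    (hK : (d.map pvKeyOf).Nodup) :
    (l.foldl
      (fun (st : List (String × String × Bool) × Int) p =>
        let key := (PySem.Str.upper p.1, PySem.Str.upper p.2)
        if st.1.any (fun e => pvKeyOf e == key)
        then (pvDictPop st.1 key, st.2 + 1)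
        else st)
      (d, r)).2
    = r + (((d.map pvKeyOf).filter
        (fun k => (l.map (fun p => (PySem.Str.upper p.1, PySem.Str.upper p.2))).contains k)).length : Int) := by
  induction l generalizing d r with
  | nil => simp
  | cons p l ih =>
    simp only [List.foldl_cons, List.map_cons]
    by_cases hmem : (PySem.Str.upper p.1, PySem.Str.upper p.2) ∈ d.map pvKeyOf
    · have hany : d.any (fun e => pvKeyOf e == (PySem.Str.upper p.1, PySem.Str.upper p.2)) = true := by
        simp only [List.any_eq_true, beq_iff_eq]
        rcases List.mem_map.1 hmem with ⟨e, he, hk⟩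
        exact ⟨e, he, hk⟩
      simp only [hany, if_true]
      rw [ih _ _ ((pvDictPop_map_keyOf d _) ▸ hK.erase _)]
      rw [pvDictPop_map_keyOf]
      rw [pvHit _ _ _ hK hmem]
      push_cast
      ring
    · have hany : d.any (fun e => pvKeyOf e == (PySem.Str.upper p.1, PySem.Str.upper p.2)) = false := by
        simp only [List.any_eq_false, beq_iff_eq]
        intro e he hk
        exact hmem (List.mem_map.2 ⟨e, he, hk⟩)
      simp only [hany, Bool.false_eq_true, if_false]
      rw [ih _ _ hK, pvMiss _ _ _ hmem]

-- a list splits by a predicate: |filter p| + |filter ¬p| = |l|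
lemma pvFilterSplit {α : Type} (l : List α) (p : α → Bool) :
    (l.filter p).length + (l.filter (fun x => !p x)).length = l.length := by
  induction l with
  | nil => rfl
  | cons a l ih =>
    simp only [List.filter_cons]
    cases h : p a <;> simp [← ih] <;> omega

-- ===== VERDICT =====
theorem invalidate_exists_cache_spec : Claim_equal_invalidate_exists_cache := by
  intro ec po _ hpre
  unfold Pre_invalidate_exists_cache at hpre
  rw [show (ec.map (fun e : String × String × Bool => (e.1, e.2.1))) = ec.map pvKeyOf from by simp [pvKeyOf]] at hpre
  unfold Spec_invalidate_exists_cache invalidate_exists_cache invalidate_exists_cache_alt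
  rw [pvFoldA po ec 0 hpre]
  set pl := po.map (fun p => (PySem.Str.upper p.1, PySem.Str.upper p.2)) with hpl
  -- membership in the Set equals membership in the raw upper-key list
  have hfc : ec.filter (fun e => !(PySem.Set.contains (PySem.Set.ofList pl) (e.1, e.2.1)))
           = ec.filter (fun e => !(pl.contains (pvKeyOf e))) := by
    apply List.filter_congr
    intro e _
    simp [PySem.Set.contains, PySem.Set.mem_ofList, pvKeyOf]
  simp only [hfc]
  -- counting over keys = counting over entries (keys are a map of entries)
  have hmap : ((ec.map pvKeyOf).filter (fun k => pl.contains k)).length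
            = (ec.filter (fun e => pl.contains (pvKeyOf e))).length := by
    rw [List.filter_map, List.length_map]
    congr 1
  have hsplit := pvFilterSplit ec (fun e => pl.contains (pvKeyOf e))
  simp only [hmap]
  omega
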